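-- pv_equiv track=rewrite | github.com/kaiadachi/neman_crawler | src/main.py | check_Kids
-- ===== SOURCE A (Python) =====
-- def check_Kids(top, cats):
-- 	if(top == "Kids"):
-- 		name = [ "girls", "boys", "baby"]
-- 		ndict = {"girls":4, "boys":4, "baby":6}
-- 		start = 0
-- 		for n in name:
-- 			for i in range(start, start + ndict[n]):
-- 				cats[i] = n + "_" + cats[i]
-- 				start = i
-- 			start = start + 1
-- 		return 1, cats
-- 	else:
-- 		return 0, []
-- ===== SOURCE B (Python) =====
-- def check_Kids(top, cats):
--     if top != "Kids":
--         return 0, []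
--     labels = ["girls"] * 4 + ["boys"] * 4 + ["baby"] * 6
--     for i, lab in enumerate(labels):
--         cats[i] = lab + "_" + cats[i]
--     return 1, cats
-- ===== Notes on version B (the rewrite author's own statement) =====
-- stated objective: simpler
-- what changed: Replaces the nested loops with a running 'start' offset and a count dict by a precomputed flat label table and one enumerate pass over indices 0..13.
import Mathlib
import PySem

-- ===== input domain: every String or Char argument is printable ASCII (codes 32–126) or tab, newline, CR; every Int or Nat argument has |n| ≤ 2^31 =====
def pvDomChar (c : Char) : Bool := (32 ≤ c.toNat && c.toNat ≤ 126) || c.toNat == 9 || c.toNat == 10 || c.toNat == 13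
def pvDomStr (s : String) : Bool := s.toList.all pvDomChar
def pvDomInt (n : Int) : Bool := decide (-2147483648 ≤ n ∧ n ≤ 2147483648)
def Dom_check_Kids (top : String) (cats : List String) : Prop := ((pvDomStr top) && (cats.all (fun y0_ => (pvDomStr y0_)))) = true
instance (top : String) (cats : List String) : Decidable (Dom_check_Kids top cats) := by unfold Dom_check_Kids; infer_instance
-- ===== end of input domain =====

-- B replaces A's nested loops + running 'start' offset by a flat precomputed label table and one
-- enumerate pass (objective: simpler). Both mutate the first 14 entries of cats in place in Python;
-- the equivalence proved here is about the return value.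


-- ===== PORT A =====
def check_Kids (top : String) (cats : List String) : Int × List String :=
  if top == "Kids" then
    let name : List String := ["girls", "boys", "baby"]
    let ndict : PySem.Dict String Int :=
      ((PySem.Dict.empty.insert "girls" 4).insert "boys" 4).insert "baby" 6
    -- for n in name: for i in range(start, start+ndict[n]): cats[i] = n+"_"+cats[i]; start = i
    -- then start = start + 1   (state = (start, cats); indexing total via pyGetD/pySetD, exact under Pre_)
    let st := name.foldl (fun (st : Int × List String) n =>
      let st2 := (PySem.List.pyRange st.1 (st.1 + ndict.getD n 0) 1).foldl
        (fun (st : Int × List String) i =>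
          (i, PySem.List.pySetD st.2 i (n ++ "_" ++ PySem.List.pyGetD st.2 i ""))) st
      (st2.1 + 1, st2.2)) ((0 : Int), cats)
    (1, st.2)
  else (0, [])

-- ===== PORT B =====
def check_Kids_alt (top : String) (cats : List String) : Int × List String :=
  if top != "Kids" then (0, [])
  else
    let labels : List String :=
      List.replicate 4 "girls" ++ List.replicate 4 "boys" ++ List.replicate 6 "baby"
    -- for i, lab in enumerate(labels): cats[i] = lab + "_" + cats[i]
    let cats' := (PySem.List.enumerate labels).foldl
      (fun (cs : List String) p =>
        PySem.List.pySetD cs p.1 (p.2 ++ "_" ++ PySem.List.pyGetD cs p.1 "")) cats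
    (1, cats')

-- ===== PRECONDITION & SPEC =====
-- Pre_ excludes exactly the inputs where A raises IndexError: top == "Kids" with fewer than
-- 14 categories (B raises the same way there).
def Pre_check_Kids (top : String) (cats : List String) : Prop := top = "Kids" → 14 ≤ cats.length
instance (top : String) (cats : List String) : Decidable (Pre_check_Kids top cats) := by unfold Pre_check_Kids; infer_instance
def pvWitness_check_Kids : String × List String :=
  ("Kids", ["a","b","c","d","e","f","g","h","i","j","k","l","m","n"])
def Spec_check_Kids (top : String) (cats : List String) (out : Int × List String) : Prop := out = check_Kids_alt top cats
instance (top : String) (cats : List String) (out : Int × List String) : Decidable (Spec_check_Kids top cats out) := by unfold Spec_check_Kids; infer_instance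

-- ===== CLAIM (what is proved, stated in full; the proofs are below) =====
def Claim_equal_check_Kids : Prop := ∀ (top : String) (cats : List String), Dom_check_Kids top cats → Pre_check_Kids top cats → Spec_check_Kids top cats (check_Kids top cats)

-- ===== LEMMAS AND PROOFS =====

-- Shared shape of both loops: apply 'cs[i] = lab + "_" + cs[i]' for each (i, lab) pair in order.
def pvUpd (cs : List String) (ps : List (Int × String)) : List String :=
  ps.foldl (fun cs p => PySem.List.pySetD cs p.1 (p.2 ++ "_" ++ PySem.List.pyGetD cs p.1 "")) cs

def pvKidPairs : List (Int × String) :=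
  [(0,"girls"),(1,"girls"),(2,"girls"),(3,"girls"),
   (4,"boys"),(5,"boys"),(6,"boys"),(7,"boys"),
   (8,"baby"),(9,"baby"),(10,"baby"),(11,"baby"),(12,"baby"),(13,"baby")]

theorem pvUpd_append (cs : List String) (ps qs : List (Int × String)) :
    pvUpd (pvUpd cs ps) qs = pvUpd cs (ps ++ qs) := by
  simp [pvUpd, List.foldl_append]

-- A's inner loop: final start = last index visited, final cats = the pvUpd updates for label n.
theorem pvInnerA (n : String) (l : List Int) (st : Int × List String) :
    l.foldl (fun st i => (i, PySem.List.pySetD st.2 i (n ++ "_" ++ PySem.List.pyGetD st.2 i ""))) st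
      = (l.getLastD st.1, pvUpd st.2 (l.map (fun i => (i, n)))) := by
  induction l generalizing st with
  | nil => simp [pvUpd]
  | cons a t ih =>
    rw [List.foldl_cons, ih]
    refine Prod.ext ?_ ?_
    · cases t <;> simp [List.getLastD]
    · simp [pvUpd]

set_option maxHeartbeats 1000000 in
theorem pvA_kids (cats : List String) : check_Kids "Kids" cats = (1, pvUpd cats pvKidPairs) := by
  unfold check_Kids
  simp only [beq_self_eq_true, if_true, List.foldl_cons, List.foldl_nil, pvInnerA, pvUpd_append]
  congr 1

theorem pvB_kids (cats : List String) :
    check_Kids_alt "Kids" cats = (1, pvUpd cats pvKidPairs) := rfl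

-- ===== VERDICT (by name: the statement is the Claim_ definition above) =====
theorem check_Kids_spec : Claim_equal_check_Kids := by
  intro top cats _ _
  unfold Spec_check_Kids
  by_cases h : top = "Kids"
  · subst h
    rw [pvA_kids, pvB_kids]
  · simp [check_Kids, check_Kids_alt, h]
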